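-- pv_equiv track=rewrite | github.com/jbrjake/giles | scripts/validate_config.py | _has_closing_bracket
-- ===== SOURCE A (Python) =====
-- def _count_trailing_backslashes(s: str, pos: int) -> int:
--     """Count consecutive backslashes immediately before position *pos*."""
--     n = 0
--     while pos - 1 - n >= 0 and s[pos - 1 - n] == "\\":
--         n += 1
--     return n
--
-- def _has_closing_bracket(s: str) -> bool:
--     """Check if s contains ] outside of quoted strings."""
--     quote_char = None  # None, '"', or "'"
--     for i, ch in enumerate(s):
--         if quote_char is None:
--             if ch in ('"', "'"):
--                 quote_char = ch
--             elif ch == ']':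
--                 return True
--         elif ch == quote_char:
--             if quote_char == '"' and _count_trailing_backslashes(s, i) % 2 != 0:
--                 continue  # escaped double quote
--             quote_char = None
--     return False
-- ===== SOURCE B (Python) =====
-- def _has_closing_bracket(s: str) -> bool:
--     """Check if s contains ] outside of quoted strings."""
--     quote = None
--     odd = False  # odd number of consecutive backslashes just before current char
--     for ch in s:
--         if quote is None:
--             if ch in ('"', "'"):
--                 quote = ch
--             elif ch == ']':
--                 return True
--         elif ch == quote and not (quote == '"' and odd):
--             quote = None
--         odd = (not odd) if ch == "\\" else False
--     return False
-- ===== Notes on version B (the rewrite author's own statement) =====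
-- stated objective: alternative
-- what changed: Replaced the backwards rescan of preceding backslashes at every closing double quote (helper _count_trailing_backslashes) by a single forward pass that maintains the parity of the current backslash run incrementally.
import Mathlib
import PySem

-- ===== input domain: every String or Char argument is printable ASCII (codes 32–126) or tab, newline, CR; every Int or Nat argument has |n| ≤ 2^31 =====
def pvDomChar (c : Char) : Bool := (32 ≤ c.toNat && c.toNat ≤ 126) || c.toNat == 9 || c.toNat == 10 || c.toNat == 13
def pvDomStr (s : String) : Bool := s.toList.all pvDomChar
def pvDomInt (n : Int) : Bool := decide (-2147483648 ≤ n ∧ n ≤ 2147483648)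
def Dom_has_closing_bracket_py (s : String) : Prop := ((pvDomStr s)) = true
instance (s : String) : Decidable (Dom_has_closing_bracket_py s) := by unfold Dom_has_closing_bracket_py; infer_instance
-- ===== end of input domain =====

-- B replaces A's backwards rescan of backslashes at each closing double quote by a single
-- forward pass that tracks the parity of the current backslash run incrementally (alternative
-- one-pass algorithm, no helper rescan).

-- ===== PORT A =====
-- port of _count_trailing_backslashes's while loop (pos = i ≥ 0, so Nat indices are exact)
def pyCTBgo (s : List Char) (pos : Nat) (n : Nat) : Nat :=
  if h : n < pos ∧ s[pos - 1 - n]? = some '\\' then pyCTBgo s pos (n + 1) else n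
  termination_by pos - n
  decreasing_by omega

-- port of _has_closing_bracket's for loop (i = index of ch, quote_char in the Option)
def goA (s : List Char) : List Char → Nat → Option Char → Bool
  | [], _, _ => false
  | ch :: rest, i, none =>
      if ch = '"' ∨ ch = '\'' then goA s rest (i + 1) (some ch)
      else if ch = ']' then true
      else goA s rest (i + 1) none
  | ch :: rest, i, some q =>
      if ch = q then
        if q = '"' ∧ pyCTBgo s i 0 % 2 ≠ 0 then goA s rest (i + 1) (some q)
        else goA s rest (i + 1) none
      else goA s rest (i + 1) (some q)

def has_closing_bracket_py (s : String) : Bool :=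
  goA s.toList s.toList 0 none

-- ===== PORT B =====
-- single pass; odd = "odd number of consecutive backslashes just before current char"
def goB : List Char → Option Char → Bool → Bool
  | [], _, _ => false
  | ch :: rest, quote, odd =>
      let odd' := if ch = '\\' then !odd else false
      match quote with
      | none =>
          if ch = '"' ∨ ch = '\'' then goB rest (some ch) odd'
          else if ch = ']' then true
          else goB rest none odd'
      | some q =>
          if ch = q ∧ ¬(q = '"' ∧ odd = true) then goB rest none odd'
          else goB rest (some q) odd'

def has_closing_bracket_py_alt (s : String) : Bool :=
  goB s.toList none false

-- ===== PRECONDITION & SPEC =====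
def Spec_has_closing_bracket_py (s : String) (out : Bool) : Prop := out = has_closing_bracket_py_alt s
instance (s : String) (out : Bool) : Decidable (Spec_has_closing_bracket_py s out) := by unfold Spec_has_closing_bracket_py; infer_instance

-- ===== CLAIM (what is proved, stated in full; the proofs are below) =====
def Claim_equal_has_closing_bracket_py : Prop := ∀ (s : String), Dom_has_closing_bracket_py s → Spec_has_closing_bracket_py s (has_closing_bracket_py s)

-- ===== LEMMAS AND PROOFS =====

-- length of the maximal all-backslash suffix
def tbRun (l : List Char) : Nat := (l.reverse.takeWhile (fun c => c = '\\')).length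

theorem tbRun_append (l : List Char) (c : Char) :
    tbRun (l ++ [c]) = if c = '\\' then tbRun l + 1 else 0 := by
  by_cases h : c = '\\' <;> simp [tbRun, h]

theorem ctb_eq_aux (s : List Char) (i : Nat) (hi : i ≤ s.length) :
    ∀ k n, i - n ≤ k → pyCTBgo s i n = n + tbRun (s.take (i - n)) := by
  intro k
  induction k with
  | zero =>
      intro n hn
      have h0 : i - n = 0 := by omega
      have hni : ¬ n < i := by omega
      unfold pyCTBgo
      simp [hni, h0, tbRun]
  | succ k ih =>
      intro n hn
      unfold pyCTBgo
      by_cases h1 : n < i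
      · by_cases h2 : s[i - 1 - n]? = some '\\'
        · have hrec := ih (n + 1) (by omega)
          have hidx : i - 1 - n = i - n - 1 := by omega
          have hlt : i - n - 1 < s.length := by omega
          have hget : s[i - n - 1]? = some '\\' := by rw [← hidx]; exact h2
          have hgetE : s[i - n - 1] = '\\' := by
            have := List.getElem?_eq_getElem hlt (l := s)
            rw [this] at hget; exact Option.some.inj hget
          have htake : s.take (i - n) = s.take (i - n - 1) ++ ['\\'] := by
            have heq : i - n = (i - n - 1) + 1 := by omega
            conv_lhs => rw [heq]
            rw [List.take_add_one, List.getElem?_eq_getElem hlt]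
            simp [hgetE]
          simp only [h1, h2, and_self, dite_true]
          rw [hrec, htake, tbRun_append]
          have heq2 : i - (n + 1) = i - n - 1 := by omega
          simp [heq2]
          omega
        · simp only [h1, true_and, h2, dite_false]
          have hlt : i - n - 1 < s.length := by omega
          have hidx : i - 1 - n = i - n - 1 := by omega
          have hne : s[i - n - 1] ≠ '\\' := by
            intro hc
            apply h2
            rw [hidx, List.getElem?_eq_getElem hlt, hc]
          have htake : s.take (i - n) = s.take (i - n - 1) ++ [s[i - n - 1]] := by
            have heq : i - n = (i - n - 1) + 1 := by omega
            conv_lhs => rw [heq]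
            rw [List.take_add_one, List.getElem?_eq_getElem hlt]
            simp
          rw [htake, tbRun_append]
          simp [hne]
      · have h0 : i - n = 0 := by omega
        simp [h1, h0, tbRun]

theorem ctb_eq (s : List Char) (i : Nat) (hi : i ≤ s.length) :
    pyCTBgo s i 0 = tbRun (s.take i) := by
  have := ctb_eq_aux s i hi (i - 0) 0 (le_refl _)
  simpa using this

theorem odd_step (pre : List Char) (ch : Char) :
    decide (tbRun (pre ++ [ch]) % 2 = 1)
      = (if ch = '\\' then !(decide (tbRun pre % 2 = 1)) else false) := by
  by_cases h : ch = '\\'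
  · rcases Nat.mod_two_eq_zero_or_one (tbRun pre) with h2 | h2 <;>
      simp [h, tbRun_append, Nat.add_mod, h2]
  · simp [h, tbRun_append]

theorem goA_eq_goB (s : List Char) :
    ∀ l pre q, s = pre ++ l →
      goA s l pre.length q = goB l q (decide (tbRun pre % 2 = 1)) := by
  intro l
  induction l with
  | nil => intro pre q hs; simp [goA, goB]
  | cons ch rest ih =>
      intro pre q hs
      have hlen : pre.length ≤ s.length := by subst hs; simp
      have hctb : pyCTBgo s pre.length 0 = tbRun pre := by
        rw [ctb_eq s pre.length hlen]
        subst hs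
        rw [List.take_left]
      have hs' : s = (pre ++ [ch]) ++ rest := by simp [hs]
      have hrec := fun q' => ih (pre ++ [ch]) q' hs'
      have hlen' : (pre ++ [ch]).length = pre.length + 1 := by simp
      rw [hlen'] at hrec
      cases q with
      | none =>
          by_cases h1 : ch = '"' ∨ ch = '\''
          · simp only [goA, goB, h1, if_true]
            rw [hrec, odd_step]
          · by_cases h2 : ch = ']'
            · simp [goA, goB, h2]
            · simp only [goA, goB, h1, h2, if_false]
              rw [hrec, odd_step]
      | some qc =>
          have hodd := odd_step pre ch
          simp only [goA, goB, hctb]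
          by_cases h1 : ch = qc
          · subst h1
            by_cases hq : ch = '"'
            · subst hq
              rcases Nat.mod_two_eq_zero_or_one (tbRun pre) with h2 | h2 <;>
                simp [h2, hrec, hodd]
            · simp [hq, hrec, hodd]
          · simp [h1, hrec, hodd]

-- ===== VERDICT (by name: the statement is the Claim_ definition above) =====
theorem has_closing_bracket_py_spec : Claim_equal_has_closing_bracket_py := by
  intro s _
  unfold Spec_has_closing_bracket_py has_closing_bracket_py has_closing_bracket_py_alt
  have := goA_eq_goB s.toList s.toList [] none (by simp)
  simpa [tbRun] using this
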